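-- pv_equiv track=rewrite | github.com/HayeAdX/Test | align_params/build_header_word_repository.py | purge_banned_words
-- ===== SOURCE A (Python) =====
-- from typing import Dict, List, Optional, Set, Tuple
--
-- def purge_banned_words(words_map: Dict[str, str], counts: Dict[str, int], banned_words: Set[str]) -> int:
--     removed = 0
--     for banned in list(banned_words):
--         if banned in words_map:
--             del words_map[banned]
--             removed += 1
--         if banned in counts:
--             del counts[banned]
--     return removed
-- ===== SOURCE B (Python) =====
-- def purge_banned_words(words_map, counts, banned_words):
--     removed = 0
--     for key in list(words_map):
--         if key in banned_words:
--             del words_map[key]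
--             removed += 1
--     for banned in banned_words:
--         counts.pop(banned, None)
--     return removed
-- ===== Notes on version B (the rewrite author's own statement) =====
-- stated objective: alternative
-- what changed: B drives the counting loop from the dict's own keys (one pass over list(words_map) testing set membership) instead of iterating banned_words and probing the dict, and purges counts in a separate pop-based pass.
import Mathlib
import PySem

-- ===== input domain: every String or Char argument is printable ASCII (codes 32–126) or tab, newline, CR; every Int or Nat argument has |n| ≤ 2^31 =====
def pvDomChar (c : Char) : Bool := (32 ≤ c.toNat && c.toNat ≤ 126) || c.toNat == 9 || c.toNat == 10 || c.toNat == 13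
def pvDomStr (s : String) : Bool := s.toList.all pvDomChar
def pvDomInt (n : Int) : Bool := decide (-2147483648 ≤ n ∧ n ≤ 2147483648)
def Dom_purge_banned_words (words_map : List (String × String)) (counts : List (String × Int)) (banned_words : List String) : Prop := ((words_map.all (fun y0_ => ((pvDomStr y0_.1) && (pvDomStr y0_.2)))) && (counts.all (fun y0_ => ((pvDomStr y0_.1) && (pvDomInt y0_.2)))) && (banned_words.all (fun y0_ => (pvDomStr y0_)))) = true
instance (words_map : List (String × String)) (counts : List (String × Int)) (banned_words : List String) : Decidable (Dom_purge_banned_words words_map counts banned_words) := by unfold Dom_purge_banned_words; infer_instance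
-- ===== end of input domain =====

-- B drives the loop from words_map's own keys (one pass testing banned-set membership) instead of
-- iterating banned_words and probing the dicts, and purges counts in a separate second pass; same
-- return value, and Source B performs the same in-place deletions as A (equivalence proved is about the
-- RETURN value).

-- ===== PORT A =====
-- state = (words_map, counts, removed); 'banned in d' = some key equals banned; 'del d[banned]'
-- = drop every pair with that key (a Python dict holds each key once).
def purge_banned_words (words_map : List (String × String)) (counts : List (String × Int)) (banned_words : List String) : Int :=
  (banned_words.foldl
    (fun (st : List (String × String) × List (String × Int) × Int) banned =>
      let st1 :=
        if st.1.any (fun p => p.1 == banned) then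
          (st.1.filter (fun p => p.1 != banned), st.2.1, st.2.2 + 1)
        else st
      if st1.2.1.any (fun p => p.1 == banned) then
        (st1.1, st1.2.1.filter (fun p => p.1 != banned), st1.2.2)
      else st1)
    (words_map, counts, 0)).2.2

-- ===== PORT B =====
-- list(words_map) = the dict's distinct keys in order; membership is tested in the banned set.
def purge_banned_words_alt (words_map : List (String × String)) (counts : List (String × Int)) (banned_words : List String) : Int :=
  let bset : PySem.Set String := PySem.Set.ofList banned_words
  let st :=
    (PySem.List.dedup (words_map.map Prod.fst)).foldl
      (fun (st : List (String × String) × Int) key =>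
        if PySem.Set.contains bset key then (st.1.filter (fun p => p.1 != key), st.2 + 1)
        else st)
      (words_map, 0)
  -- the counts.pop(banned, None) loop: mutates counts only, never the return value
  let _cs := banned_words.foldl (fun c banned => c.filter (fun p => p.1 != banned)) counts
  st.2

-- ===== PRECONDITION & SPEC =====
def Spec_purge_banned_words (words_map : List (String × String)) (counts : List (String × Int)) (banned_words : List String) (out : Int) : Prop := out = purge_banned_words_alt words_map counts banned_words
instance (words_map : List (String × String)) (counts : List (String × Int)) (banned_words : List String) (out : Int) : Decidable (Spec_purge_banned_words words_map counts banned_words out) := by unfold Spec_purge_banned_words; infer_instance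

-- ===== CLAIM (what is proved, stated in full; the proofs are below) =====
def Claim_equal_purge_banned_words : Prop := ∀ (words_map : List (String × String)) (counts : List (String × Int)) (banned_words : List String), Dom_purge_banned_words words_map counts banned_words → Spec_purge_banned_words words_map counts banned_words (purge_banned_words words_map counts banned_words)

-- ===== LEMMAS AND PROOFS =====

-- keys of the filtered map = keys minus the removed one
theorem keys_filter_toFinset {ν : Type} (w : List (String × ν)) (b : String) :
    ((w.filter (fun p => p.1 != b)).map Prod.fst).toFinset = (w.map Prod.fst).toFinset.erase b := by
  ext x
  simp only [List.mem_toFinset, List.mem_map, List.mem_filter, Finset.mem_erase, ne_eq, bne_iff_ne]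
  aesop

-- 'banned in d' as a Finset membership
theorem any_key_iff {ν : Type} (w : List (String × ν)) (b : String) :
    (w.any (fun p => p.1 == b)) = true ↔ b ∈ (w.map Prod.fst).toFinset := by
  simp only [List.any_eq_true, beq_iff_eq, List.mem_toFinset, List.mem_map]

-- A's loop: removed = |banned_words ∩ keys(words_map)| as finite sets.
theorem purge_A_count (banned_words : List String) :
    ∀ (w : List (String × String)) (c : List (String × Int)) (r : Int),
    (banned_words.foldl
      (fun (st : List (String × String) × List (String × Int) × Int) banned =>
        let st1 :=
          if st.1.any (fun p => p.1 == banned) then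
            (st.1.filter (fun p => p.1 != banned), st.2.1, st.2.2 + 1)
          else st
        if st1.2.1.any (fun p => p.1 == banned) then
          (st1.1, st1.2.1.filter (fun p => p.1 != banned), st1.2.2)
        else st1)
      (w, c, r)).2.2
      = r + ((banned_words.toFinset ∩ (w.map Prod.fst).toFinset).card : Int) := by
  induction banned_words with
  | nil => intro w c r; simp
  | cons b rest ih =>
    intro w c r
    rw [List.foldl_cons]
    by_cases hw : w.any (fun p => p.1 == b) = true
    · have hb : b ∈ (w.map Prod.fst).toFinset := (any_key_iff w b).1 hw
      simp only [hw, if_true]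
      have main : ∀ c' : List (String × Int),
          (rest.foldl
            (fun (st : List (String × String) × List (String × Int) × Int) banned =>
              let st1 :=
                if st.1.any (fun p => p.1 == banned) then
                  (st.1.filter (fun p => p.1 != banned), st.2.1, st.2.2 + 1)
                else st
              if st1.2.1.any (fun p => p.1 == banned) then
                (st1.1, st1.2.1.filter (fun p => p.1 != banned), st1.2.2)
              else st1)
            (w.filter (fun p => p.1 != b), c', r + 1)).2.2
          = r + (((b :: rest).toFinset ∩ (w.map Prod.fst).toFinset).card : Int) := by
        intro c'
        rw [ih, keys_filter_toFinset]
        have h2 : (insert b rest.toFinset ∩ (w.map Prod.fst).toFinset).card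
            = (rest.toFinset ∩ ((w.map Prod.fst).toFinset.erase b)).card + 1 := by
          have h1 : insert b rest.toFinset ∩ (w.map Prod.fst).toFinset
              = insert b (rest.toFinset ∩ (w.map Prod.fst).toFinset.erase b) := by
            ext x
            simp only [Finset.mem_insert, Finset.mem_inter, Finset.mem_erase]
            by_cases hx : x = b <;> simp [hx, hb]
          rw [h1, Finset.card_insert_of_notMem (by simp)]
        simp only [List.toFinset_cons, h2]
        push_cast; ring
      split_ifs <;> exact main _
    · have hb : b ∉ (w.map Prod.fst).toFinset := fun h => hw ((any_key_iff w b).2 h)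
      have h1 : insert b rest.toFinset ∩ (w.map Prod.fst).toFinset
          = rest.toFinset ∩ (w.map Prod.fst).toFinset := by
        ext x
        simp only [Finset.mem_insert, Finset.mem_inter]
        constructor
        · rintro ⟨(rfl | h), hx⟩
          · exact absurd hx hb
          · exact ⟨h, hx⟩
        · exact fun ⟨h, hx⟩ => ⟨Or.inr h, hx⟩
      by_cases hc : c.any (fun p => p.1 == b) = true
      · simp only [hw, if_false, hc, if_true, Bool.false_eq_true]
        rw [ih]
        simp only [List.toFinset_cons, h1]
      · simp only [hw, hc, if_false, Bool.false_eq_true]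
        rw [ih]
        simp only [List.toFinset_cons, h1]

-- B's loop: removed = number of visited keys in the banned set (the map state is irrelevant).
theorem purge_B_count (bset : PySem.Set String) (ks : List String) :
    ∀ (w : List (String × String)) (r : Int),
    (ks.foldl
      (fun (st : List (String × String) × Int) key =>
        if PySem.Set.contains bset key then (st.1.filter (fun p => p.1 != key), st.2 + 1)
        else st)
      (w, r)).2
      = r + ((ks.countP (fun key => PySem.Set.contains bset key)) : Int) := by
  induction ks with
  | nil => intro w r; simp
  | cons k ks ih =>
    intro w r
    by_cases h : PySem.Set.contains bset k
    · simp only [List.foldl_cons, if_true, List.countP_cons, h]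
      rw [ih]
      push_cast
      ring
    · simp only [List.foldl_cons, List.countP_cons, h, if_false, Bool.false_eq_true]
      rw [ih]
      simp

-- distinct keys in the banned set, counted, = |banned ∩ keys| as finite sets
theorem countP_dedup_card (L bw : List String) :
    ((PySem.List.dedup L).countP (fun k => PySem.Set.contains (PySem.Set.ofList bw) k))
    = (bw.toFinset ∩ L.toFinset).card := by
  have hp : ∀ k, (PySem.Set.contains (PySem.Set.ofList bw) k) = decide (k ∈ bw) := by
    intro k
    by_cases h : k ∈ bw
    · simp [PySem.Set.mem_ofList, h]
    · simp only [decide_eq_false h]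
      rw [← Bool.not_eq_true]
      simp [PySem.Set.mem_ofList, h]
  simp only [hp]
  rw [List.countP_eq_length_filter]
  have hnd : ((PySem.List.dedup L).filter (fun k => decide (k ∈ bw))).Nodup :=
    (PySem.List.nodup_dedup L).filter _
  rw [← List.toFinset_card_of_nodup hnd]
  congr 1
  ext x
  simp only [List.mem_toFinset, List.mem_filter, PySem.List.mem_dedup, decide_eq_true_eq,
    Finset.mem_inter]
  tauto

-- ===== VERDICT (by name: the statement is the Claim_ definition above) =====
theorem purge_banned_words_spec : Claim_equal_purge_banned_words := by
  intro words_map counts banned_words _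
  unfold Spec_purge_banned_words purge_banned_words purge_banned_words_alt
  rw [purge_A_count, purge_B_count, countP_dedup_card]
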